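-- pv_equiv track=rewrite | github.com/Teus36/Estudos-IFRN | Lista de exercícios 8/2.py | simbolos
-- ===== SOURCE A (Python) =====
-- def simbolos(string):
--     vogais = ['a', 'e', 'i', 'o', 'u']
--     simbolos = ['#', '@', '*', '$', '&']
--     texto_codificado = ''
--
--     for letra in string:
--         if letra.lower() in vogais:
--             indice = vogais.index(letra.lower())
--             texto_codificado += simbolos[indice]
--         else:
--             texto_codificado += letra
--
--     return texto_codificado
-- ===== SOURCE B (Python) =====
-- def simbolos(string):
--     for v, s in zip('aeiou', '#@*$&'):
--         string = string.replace(v, s).replace(v.upper(), s)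
--     return string
-- ===== Notes on version B (the rewrite author's own statement) =====
-- stated objective: alternative
-- what changed: Instead of one character-by-character scan with a vowel-list lookup and string accumulation, B makes five staged whole-string passes, rewriting each vowel (lower and upper case) to its symbol with str.replace; correct because the symbols are not vowels, so later passes never touch earlier substitutions.
import Mathlib
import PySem

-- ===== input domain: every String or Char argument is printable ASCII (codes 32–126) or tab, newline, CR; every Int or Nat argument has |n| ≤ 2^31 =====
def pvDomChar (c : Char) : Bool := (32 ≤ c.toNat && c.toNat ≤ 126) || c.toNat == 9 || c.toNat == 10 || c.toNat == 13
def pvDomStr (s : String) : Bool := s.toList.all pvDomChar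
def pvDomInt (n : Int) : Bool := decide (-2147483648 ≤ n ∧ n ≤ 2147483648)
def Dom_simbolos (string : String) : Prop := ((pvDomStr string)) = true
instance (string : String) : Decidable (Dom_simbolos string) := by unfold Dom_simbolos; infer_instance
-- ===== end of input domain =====

-- B replaces the per-character scan-and-accumulate loop by five staged whole-string str.replace passes
-- (one vowel, both cases, per pass); alternative decomposition, same result.

-- ===== PORT A =====
def simbolos (string : String) : String :=
  let vogais : List Char := ['a', 'e', 'i', 'o', 'u']
  let simb : List Char := ['#', '@', '*', '$', '&']
  -- texto_codificado built by += over the characters of string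
  String.ofList (string.toList.foldl (fun acc letra =>
    if PySem.Chars.lowerChar letra ∈ vogais then
      -- vogais.index(letra.lower()) never fails here (membership just checked); default letra unreachable
      acc ++ [match PySem.List.index? vogais (PySem.Chars.lowerChar letra) with
              | some indice => simb.getD indice letra
              | none => letra]
    else
      acc ++ [letra]) [])

-- ===== PORT B =====
-- for v, s in zip('aeiou', '#@*$&'): string = string.replace(v, s).replace(v.upper(), s)
def simbolos_alt (string : String) : String :=
  (List.zip ['a','e','i','o','u'] ['#','@','*','$','&']).foldl
    (fun st p =>
      PySem.Str.replace
        (PySem.Str.replace st (String.ofList [p.1]) (String.ofList [p.2]))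
        (String.ofList [PySem.Chars.upperChar p.1]) (String.ofList [p.2]))
    string

-- ===== PRECONDITION & SPEC =====
def Spec_simbolos (string : String) (out : String) : Prop := out = simbolos_alt string
instance (string : String) (out : String) : Decidable (Spec_simbolos string out) := by unfold Spec_simbolos; infer_instance

-- ===== CLAIM (what is proved, stated in full; the proofs are below) =====
def Claim_equal_simbolos : Prop := ∀ (string : String), Dom_simbolos string → Spec_simbolos string (simbolos string)

-- ===== LEMMAS AND PROOFS =====

-- A's per-character output
def pvStepA (letra : Char) : Char :=
  if PySem.Chars.lowerChar letra ∈ (['a', 'e', 'i', 'o', 'u'] : List Char) then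
    match PySem.List.index? (['a', 'e', 'i', 'o', 'u'] : List Char) (PySem.Chars.lowerChar letra) with
    | some indice => (['#', '@', '*', '$', '&'] : List Char).getD indice letra
    | none => letra
  else letra

theorem pvFoldA (l : List Char) (acc : List Char) :
    l.foldl (fun acc letra =>
      if PySem.Chars.lowerChar letra ∈ (['a', 'e', 'i', 'o', 'u'] : List Char) then
        acc ++ [match PySem.List.index? (['a', 'e', 'i', 'o', 'u'] : List Char) (PySem.Chars.lowerChar letra) with
                | some indice => (['#', '@', '*', '$', '&'] : List Char).getD indice letra
                | none => letra]
      else acc ++ [letra]) acc = acc ++ l.map pvStepA := by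
  induction l generalizing acc with
  | nil => simp
  | cons c cs ih =>
    simp only [List.foldl_cons, List.map_cons, ih, pvStepA]
    split_ifs <;> simp

-- single-character replace is a pointwise map
theorem pvGo_single (v w : Char) : ∀ (fuel : Nat) (l acc : List Char), l.length ≤ fuel →
    PySem.Chars.replace.go [v] [w] fuel l acc
      = acc.reverse ++ l.map (fun c => if c = v then w else c) := by
  intro fuel
  induction fuel with
  | zero =>
    intro l acc h
    have : l = [] := List.eq_nil_of_length_eq_zero (Nat.le_zero.mp h)
    subst this
    simp [PySem.Chars.replace.go]
  | succ n ih =>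
    intro l acc h
    cases l with
    | nil => simp [PySem.Chars.replace.go]
    | cons c t =>
      simp only [PySem.Chars.replace.go]
      by_cases hc : c = v
      · subst hc
        have hp : List.isPrefixOf [c] (c :: t) = true := by simp [List.isPrefixOf]
        rw [if_pos hp]
        simp only [List.length_cons] at h
        rw [ih _ _ (by simpa using Nat.le_of_succ_le_succ h)]
        simp
      · have hp : List.isPrefixOf [v] (c :: t) = false := by
          simp [List.isPrefixOf]
          exact fun hvc => absurd hvc.symm hc
        rw [if_neg (by simp [hp])]
        simp only [List.length_cons] at h
        rw [ih _ _ (Nat.le_of_succ_le_succ h)]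
        simp [hc]

theorem pvReplace_single (v w : Char) (l : List Char) :
    PySem.Chars.replace l [v] [w] = l.map (fun c => if c = v then w else c) := by
  simp [PySem.Chars.replace, pvGo_single v w l.length l [] le_rfl]

-- B's composed per-character substitution (the ten staged passes, innermost first)
def pvStepB : Char → Char :=
  (fun c => if c = PySem.Chars.upperChar 'u' then '&' else c) ∘
    (fun c => if c = 'u' then '&' else c) ∘
      (fun c => if c = PySem.Chars.upperChar 'o' then '$' else c) ∘
        (fun c => if c = 'o' then '$' else c) ∘
          (fun c => if c = PySem.Chars.upperChar 'i' then '*' else c) ∘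
            (fun c => if c = 'i' then '*' else c) ∘
              (fun c => if c = PySem.Chars.upperChar 'e' then '@' else c) ∘
                (fun c => if c = 'e' then '@' else c) ∘
                  (fun c => if c = PySem.Chars.upperChar 'a' then '#' else c) ∘ fun c =>
                    if c = 'a' then '#' else c

theorem pvAlt_eq_map (s : String) :
    simbolos_alt s = String.ofList (s.toList.map pvStepB) := by
  unfold simbolos_alt
  simp only [List.zip_cons_cons, List.zip_nil_right, List.foldl_cons, List.foldl_nil]
  simp only [PySem.Str.replace, String.toList_ofList, pvReplace_single, List.map_map]
  rfl

set_option maxRecDepth 8000 in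
set_option maxHeartbeats 1600000 in
theorem pvChar_eq (c : Char) (hc : pvDomChar c = true) : pvStepA c = pvStepB c := by
  have h126 : c.toNat ≤ 126 := by
    simp only [pvDomChar, Bool.or_eq_true, Bool.and_eq_true, decide_eq_true_eq, beq_iff_eq] at hc
    omega
  have hofnat : Char.ofNat c.toNat = c := Char.ofNat_toNat c
  have key : ∀ n : Fin 127, pvStepA (Char.ofNat n.val) = pvStepB (Char.ofNat n.val) := by decide
  have := key ⟨c.toNat, by omega⟩
  simpa [hofnat] using this

-- ===== VERDICT (by name: the statement is the Claim_ definition above) =====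
set_option maxHeartbeats 1600000 in
theorem simbolos_spec : Claim_equal_simbolos := by
  intro s hdom
  unfold Spec_simbolos simbolos
  rw [pvAlt_eq_map]
  simp only []
  rw [pvFoldA]
  simp only [List.nil_append]
  refine congrArg String.ofList (List.map_congr_left ?_)
  intro c hcmem
  exact pvChar_eq c (by
    have := (List.all_eq_true.mp hdom) c hcmem
    simpa using this)
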